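-- pv_equiv track=rewrite | github.com/thibault883/5WWIPython | 10-strings/Cryptografie voor dummies.py | versleutel_zin
-- ===== SOURCE A (Python) =====
-- def versleutel_woord(woord, aantal):
--     woord = woord.upper()
--     uitkomst = ''
--     for i in range(len(woord)):
--         uitkomst += chr(ord(woord[i]) + aantal)
--
--     return uitkomst
--
-- def versleutel_zin(zin, aantal):
--     zin = zin.upper()
--     uitkomst = ''
--     for i in range(len(zin)):
--         if zin[i] == ' ':
--             uitkomst += '@'
--         elif chr(ord(zin[i]) + aantal) == '@':
--             uitkomst += ' '
--         else:
--             uitkomst += versleutel_woord(zin[i], aantal)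
--
--     return uitkomst
-- ===== SOURCE B (Python) =====
-- def versleutel_zin(zin, aantal):
--     zin = zin.upper()
--     tabel = {}
--     for c in dict.fromkeys(zin):
--         if c == ' ':
--             tabel[ord(c)] = '@'
--         elif ord(c) + aantal == 64:
--             tabel[ord(c)] = ' '
--         else:
--             tabel[ord(c)] = chr(ord(c) + aantal)
--     return zin.translate(tabel)
-- ===== Notes on version B (the rewrite author's own statement) =====
-- stated objective: faster
-- what changed: A's per-character branch-and-concatenate loop is replaced by building a translation table once over the distinct characters (dict.fromkeys) and a single str.translate pass; the nested versleutel_woord call disappears and per-character work moves from Python bytecode to C.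
-- outside the precondition, e.g. on versleutel_zin('A', -100): A raises ValueError, B raises ValueError
import Mathlib
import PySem

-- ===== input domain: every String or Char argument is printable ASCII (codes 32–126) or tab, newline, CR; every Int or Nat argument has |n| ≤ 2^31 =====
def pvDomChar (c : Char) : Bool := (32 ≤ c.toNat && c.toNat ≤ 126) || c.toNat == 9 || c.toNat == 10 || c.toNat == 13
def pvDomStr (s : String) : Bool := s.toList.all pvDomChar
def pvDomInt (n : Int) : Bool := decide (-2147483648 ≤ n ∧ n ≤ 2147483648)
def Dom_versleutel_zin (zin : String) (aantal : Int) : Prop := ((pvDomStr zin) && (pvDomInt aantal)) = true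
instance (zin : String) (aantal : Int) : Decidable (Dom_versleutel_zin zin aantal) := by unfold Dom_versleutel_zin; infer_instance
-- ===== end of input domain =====

-- B replaces A's per-character branch-and-concatenate loop by a translation table built once
-- over the distinct characters and a single str.translate pass (constant-factor faster as measured).

-- chr(o) for a valid code point o (Pre_ guarantees validity wherever the ports are compared)
def pyChr (o : Int) : Char := Char.ofNat o.toNat

-- ===== PORT A =====
def versleutel_woord (woord : String) (aantal : Int) : String :=
  String.ofList ((PySem.Str.upper woord).toList.foldl
    (fun acc c => acc ++ [pyChr ((c.toNat : Int) + aantal)]) [])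

def versleutel_zin (zin : String) (aantal : Int) : String :=
  String.ofList ((PySem.Str.upper zin).toList.foldl
    (fun acc c =>
      if c = ' ' then acc ++ ['@']
      else if pyChr ((c.toNat : Int) + aantal) = '@' then acc ++ [' ']
      else acc ++ (versleutel_woord (String.ofList [c]) aantal).toList) [])

-- ===== PORT B =====
-- the table entry for one distinct character (body of B's table-building loop)
def vzTabelWaarde (aantal : Int) (c : Char) : String :=
  if c = ' ' then "@"
  else if (c.toNat : Int) + aantal = 64 then " "
  else String.ofList [pyChr ((c.toNat : Int) + aantal)]

def versleutel_zin_alt (zin : String) (aantal : Int) : String :=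
  let z := (PySem.Str.upper zin).toList
  let tabel : PySem.Dict Int String :=
    (PySem.List.dedup z).foldl
      (fun d c => d.insert ((c.toNat : Int)) (vzTabelWaarde aantal c)) PySem.Dict.empty
  -- z.translate(tabel): each character replaced by its table entry (itself if absent)
  String.ofList (z.flatMap (fun c => (PySem.Dict.getD tabel ((c.toNat : Int)) (String.ofList [c])).toList))

-- ===== PRECONDITION & SPEC =====
-- Pre_ excludes the inputs where chr(ord(c)+aantal) raises ValueError (code point < 0 or > 0x10FFFF)
-- and, additionally, the shifts landing in the surrogate range U+D800–U+DFFF: there Python A returns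
-- a lone-surrogate string, which is not representable as a Lean String value.
def Pre_versleutel_zin (zin : String) (aantal : Int) : Prop :=
  ((PySem.Str.upper zin).toList.all (fun c =>
    decide (c = ' ') ||
    (decide (0 ≤ (c.toNat : Int) + aantal) &&
     (decide ((c.toNat : Int) + aantal < 55296) ||
      (decide (57344 ≤ (c.toNat : Int) + aantal) && decide ((c.toNat : Int) + aantal ≤ 1114111)))))) = true
instance (zin : String) (aantal : Int) : Decidable (Pre_versleutel_zin zin aantal) := by
  unfold Pre_versleutel_zin; infer_instance

def pvWitness_versleutel_zin : String × Int := ("Dit is een zin!", 3)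

def Spec_versleutel_zin (zin : String) (aantal : Int) (out : String) : Prop := out = versleutel_zin_alt zin aantal
instance (zin : String) (aantal : Int) (out : String) : Decidable (Spec_versleutel_zin zin aantal out) := by unfold Spec_versleutel_zin; infer_instance

-- ===== CLAIM (what is proved, stated in full; the proofs are below) =====
def Claim_equal_versleutel_zin : Prop := ∀ (zin : String) (aantal : Int), Dom_versleutel_zin zin aantal → Pre_versleutel_zin zin aantal → Spec_versleutel_zin zin aantal (versleutel_zin zin aantal)

-- ===== LEMMAS AND PROOFS =====

-- (Char.ofNat n).toNat = n on valid code points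
lemma chr_toNat (n : Nat) (h : n.isValidChar) : (Char.ofNat n).toNat = n := by
  simp [Char.ofNat, h, Char.ofNatAux, Char.toNat]

lemma char_eq_of_toNat (a b : Char) (h : a.toNat = b.toNat) : a = b := by
  have := Char.ofNat_toNat a; rw [h, Char.ofNat_toNat] at this; exact this.symm

lemma islower_iff (c : Char) : PySem.Chars.islower c = true ↔ 97 ≤ c.toNat ∧ c.toNat ≤ 122 := by
  simp [PySem.Chars.islower, Char.le_def, UInt32.le_iff_toNat_le, Char.toNat_val]

-- upperChar is idempotent (a character of an already-uppercased string is fixed by upper)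
lemma upperChar_idem (c : Char) :
    PySem.Chars.upperChar (PySem.Chars.upperChar c) = PySem.Chars.upperChar c := by
  by_cases h : PySem.Chars.islower c = true
  · have hb := (islower_iff c).mp h
    have hv : (c.toNat - 32).isValidChar := Or.inl (by omega)
    have hf : PySem.Chars.islower (Char.ofNat (c.toNat - 32)) = false := by
      rw [Bool.eq_false_iff]; intro hc
      have h1 := (islower_iff _).mp hc
      rw [chr_toNat _ hv] at h1; omega
    unfold PySem.Chars.upperChar
    simp [h, hf]
  · unfold PySem.Chars.upperChar
    simp [h]

-- a fold of inserts at keys all different from k leaves get? at k unchanged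
lemma get?_foldl_insert_not_mem (aantal : Int) (t : List Char) (d : PySem.Dict Int String)
    (k : Int) (h : ∀ x ∈ t, ((x.toNat : Int)) ≠ k) :
    PySem.Dict.get?
      (t.foldl (fun d c => d.insert ((c.toNat : Int)) (vzTabelWaarde aantal c)) d) k
    = PySem.Dict.get? d k := by
  induction t generalizing d with
  | nil => rfl
  | cons x t ih =>
    simp only [List.foldl_cons]
    rw [ih _ (fun y hy => h y (List.mem_cons_of_mem _ hy))]
    exact PySem.Dict.get?_insert_of_ne d _ (fun he => h x List.mem_cons_self he.symm)

-- in the table built over a duplicate-free list, each listed character maps to its entry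
lemma get?_tabel (aantal : Int) (l : List Char) (d : PySem.Dict Int String)
    (hnd : l.Nodup) (c : Char) (hc : c ∈ l) :
    PySem.Dict.get?
      (l.foldl (fun d c => d.insert ((c.toNat : Int)) (vzTabelWaarde aantal c)) d)
      ((c.toNat : Int))
    = some (vzTabelWaarde aantal c) := by
  induction l generalizing d with
  | nil => cases hc
  | cons x t ih =>
    rw [List.nodup_cons] at hnd
    rcases List.mem_cons.mp hc with rfl | hct
    · simp only [List.foldl_cons]
      rw [get?_foldl_insert_not_mem aantal t _ _ ?_]
      · exact PySem.Dict.get?_insert_self d _ _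
      · intro y hy he
        exact hnd.1 (char_eq_of_toNat y c (by exact_mod_cast he) ▸ hy)
    · simp only [List.foldl_cons]
      exact ih _ hnd.2 hct

-- the per-character piece A appends, as a list of characters
def vzStukA (aantal : Int) (c : Char) : List Char :=
  if c = ' ' then ['@']
  else if pyChr ((c.toNat : Int) + aantal) = '@' then [' ']
  else (versleutel_woord (String.ofList [c]) aantal).toList

-- under the Pre_ validity bounds, the shifted character equals '@' exactly when the code is 64
lemma pyChr_eq_at_iff (o : Int) (h0 : 0 ≤ o)
    (hv : o < 55296 ∨ (57344 ≤ o ∧ o ≤ 1114111)) :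
    (pyChr o = '@') ↔ o = 64 := by
  constructor
  · intro h
    have hval : o.toNat.isValidChar := by
      rcases hv with h1 | h1
      · exact Or.inl (by omega)
      · exact Or.inr ⟨by omega, by omega⟩
    have h2 := chr_toNat o.toNat hval
    rw [show Char.ofNat o.toNat = pyChr o from rfl, h] at h2
    have : o.toNat = 64 := by rw [← h2]; rfl
    omega
  · intro h; subst h; rfl

-- for a character of the uppercased string, A's piece equals B's table entry
-- Pre_ in quantifier form
lemma pre_forall (zin : String) (aantal : Int) (h : Pre_versleutel_zin zin aantal) :
    ∀ c ∈ (PySem.Str.upper zin).toList, c ≠ ' ' →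
    0 ≤ (c.toNat : Int) + aantal ∧
    ((c.toNat : Int) + aantal < 55296 ∨
     (57344 ≤ (c.toNat : Int) + aantal ∧ (c.toNat : Int) + aantal ≤ 1114111)) := by
  unfold Pre_versleutel_zin at h
  rw [List.all_eq_true] at h
  intro c hc hsp
  have h2 := h c hc
  simp [hsp] at h2
  tauto

lemma stuk_eq (zin : String) (aantal : Int) (hpre : Pre_versleutel_zin zin aantal)
    (c : Char) (hc : c ∈ (PySem.Str.upper zin).toList) :
    vzStukA aantal c = (vzTabelWaarde aantal c).toList := by
  have hfix : PySem.Chars.upperChar c = c := by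
    rw [PySem.Str.toList_upper, PySem.Chars.upper] at hc
    rcases List.mem_map.mp hc with ⟨x, _, rfl⟩
    exact upperChar_idem x
  unfold vzStukA vzTabelWaarde
  by_cases hsp : c = ' '
  · simp [hsp]
  · obtain ⟨h0, hv⟩ := pre_forall zin aantal hpre c hc hsp
    have hiff := pyChr_eq_at_iff ((c.toNat : Int) + aantal) h0 hv
    by_cases h64 : (c.toNat : Int) + aantal = 64
    · rw [if_neg hsp, if_pos (hiff.mpr h64), if_neg hsp, if_pos h64]
      decide
    · have hne : ¬ (pyChr ((c.toNat : Int) + aantal) = '@') := fun h => h64 (hiff.mp h)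
      simp only [hsp, if_false, hne, h64]
      unfold versleutel_woord
      rw [PySem.Str.toList_upper, String.toList_ofList, PySem.Chars.upper]
      simp [hfix]

-- ===== VERDICT (by name: the statement is the Claim_ definition above) =====
theorem versleutel_zin_spec : Claim_equal_versleutel_zin := by
  intro zin aantal _hdom hpre
  unfold Spec_versleutel_zin
  simp only [versleutel_zin, versleutel_zin_alt]
  have hbody : (fun (acc : List Char) (c : Char) =>
      if c = ' ' then acc ++ ['@']
      else if pyChr ((c.toNat : Int) + aantal) = '@' then acc ++ [' ']
      else acc ++ (versleutel_woord (String.ofList [c]) aantal).toList)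
      = fun acc c => acc ++ vzStukA aantal c := by
    funext acc c; unfold vzStukA; split_ifs <;> rfl
  rw [hbody, PySem.List.foldl_append_eq_flatMap, List.nil_append]
  refine congrArg String.ofList (List.flatMap_congr ?_)
  intro c hc
  rw [stuk_eq zin aantal hpre c hc]
  have hg := get?_tabel aantal (PySem.List.dedup (PySem.Str.upper zin).toList)
      PySem.Dict.empty (PySem.List.nodup_dedup _) c
      ((PySem.List.mem_dedup _ _).mpr hc)
  rw [PySem.Dict.getD, hg]
  rfl
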